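-- pv_equiv track=rewrite | github.com/Landser98/test_scanner | bankparserui/src/bcc_ind/parser.py | _norm_desc_keep_newlines
-- ===== SOURCE A (Python) =====
-- def _norm_spaces_basic(s: str) -> str:
--     if s is None:
--         return ""
--     return (str(s)
--             .replace("\u00A0", " ")
--             .replace("\u202F", " ")
--             .replace("\r", " ")
--             .replace("\t", " ")
--             .strip())
--
-- def _norm_desc_keep_newlines(s: str) -> str:
--     if s is None:
--         return ""
--     lines = str(s).split("\n")
--     lines = [_norm_spaces_basic(x) for x in lines]
--     out = []
--     for ln in lines:
--         if ln == "" and (not out or out[-1] == ""):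
--             continue
--         out.append(ln)
--     return "\n".join(out).strip()
-- ===== SOURCE B (Python) =====
-- def _norm_desc_keep_newlines(s: str) -> str:
--     if s is None:
--         return ""
--     paras, cur = [], []
--     for raw in str(s).split("\n"):
--         ln = (raw.replace("\u00A0", " ").replace("\u202F", " ")
--                  .replace("\r", " ").replace("\t", " ").strip())
--         if ln:
--             cur.append(ln)
--         elif cur:
--             paras.append(cur)
--             cur = []
--     if cur:
--         paras.append(cur)
--     return "\n\n".join("\n".join(p) for p in paras)
-- ===== Notes on version B (the rewrite author's own statement) =====
-- stated objective: alternative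
-- what changed: A's blank-line-collapsing accumulator loop followed by a global strip is replaced by grouping the nonblank normalized lines into paragraphs and joining the paragraphs with a blank-line separator: blank lines are never emitted and no final strip is needed.
import Mathlib
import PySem

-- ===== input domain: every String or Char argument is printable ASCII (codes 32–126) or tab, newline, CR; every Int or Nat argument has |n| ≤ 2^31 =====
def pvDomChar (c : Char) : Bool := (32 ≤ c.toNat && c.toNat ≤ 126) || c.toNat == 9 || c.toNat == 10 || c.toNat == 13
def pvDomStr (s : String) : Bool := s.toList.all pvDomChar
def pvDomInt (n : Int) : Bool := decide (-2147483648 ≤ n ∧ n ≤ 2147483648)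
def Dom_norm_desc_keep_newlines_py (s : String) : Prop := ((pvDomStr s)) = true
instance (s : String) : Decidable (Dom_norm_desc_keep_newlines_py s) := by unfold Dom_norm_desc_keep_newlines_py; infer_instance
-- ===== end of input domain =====

-- B replaces A's blank-collapsing accumulator loop plus global strip by grouping nonblank
-- normalized lines into paragraphs joined with "\n\n" (objective: alternative decomposition).

-- ===== PORT A =====
-- helper _norm_spaces_basic (the None branch is unreachable for a String argument)
def pvNormSpacesBasicA (x : List Char) : List Char :=
  PySem.Chars.strip (PySem.Chars.replace (PySem.Chars.replace (PySem.Chars.replace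
    (PySem.Chars.replace x [Char.ofNat 160] [' ']) [Char.ofNat 8239] [' ']) ['\r'] [' ']) ['\t'] [' '])

def norm_desc_keep_newlines_py (s : String) : String :=
  let lines := (PySem.Chars.splitOn s.toList ['\n']).map pvNormSpacesBasicA
  let out := lines.foldl
    (fun out ln => if ln = [] ∧ (out = [] ∨ out.getLast? = some []) then out else out ++ [ln]) []
  String.ofList (PySem.Chars.strip (PySem.Chars.join ['\n'] out))

-- ===== PORT B =====
-- B normalizes each split line inside the loop, groups nonblank lines into paragraphs
-- (state = (finished paragraphs, current paragraph)), and joins with "\n\n".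
def norm_desc_keep_newlines_py_alt (s : String) : String :=
  let st := (PySem.Chars.splitOn s.toList ['\n']).foldl
    (fun (st : List (List (List Char)) × List (List Char)) raw =>
      let ln := PySem.Chars.strip (PySem.Chars.replace (PySem.Chars.replace (PySem.Chars.replace
        (PySem.Chars.replace raw [Char.ofNat 160] [' ']) [Char.ofNat 8239] [' ']) ['\r'] [' ']) ['\t'] [' '])
      if ln ≠ [] then (st.1, st.2 ++ [ln])
      else if st.2 ≠ [] then (st.1 ++ [st.2], []) else st)
    ([], [])
  let paras := if st.2 ≠ [] then st.1 ++ [st.2] else st.1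
  String.ofList (PySem.Chars.join ['\n', '\n'] (paras.map (PySem.Chars.join ['\n'])))

-- ===== PRECONDITION & SPEC =====
def Spec_norm_desc_keep_newlines_py (s : String) (out : String) : Prop := out = norm_desc_keep_newlines_py_alt s
instance (s : String) (out : String) : Decidable (Spec_norm_desc_keep_newlines_py s out) := by unfold Spec_norm_desc_keep_newlines_py; infer_instance

-- ===== CLAIM (what is proved, stated in full; the proofs are below) =====
def Claim_equal_norm_desc_keep_newlines_py : Prop := ∀ (s : String), Dom_norm_desc_keep_newlines_py s → Spec_norm_desc_keep_newlines_py s (norm_desc_keep_newlines_py s)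

-- ===== LEMMAS AND PROOFS =====

-- the blank-collapsing state machine A computes (prev = "previous position was blank or start")
def pvG : Bool → List (List Char) → List (List Char)
  | _, [] => []
  | prev, x :: t => if x = [] then (if prev then pvG true t else [] :: pvG true t) else x :: pvG false t

-- B's paragraph grouping, as a recursion (cur = current open paragraph)
def pvP : List (List Char) → List (List Char) → List (List (List Char))
  | cur, [] => if cur = [] then [] else [cur]
  | cur, x :: t => if x = [] then (if cur = [] then pvP [] t else cur :: pvP [] t)
                   else pvP (cur ++ [x]) t

-- paragraphs with a single blank line interspersed
def pvInter : List (List (List Char)) → List (List Char)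
  | [] => []
  | [p] => p
  | p :: q :: r => p ++ [[]] ++ pvInter (q :: r)

-- drop one trailing blank line
def pvK2 (K : List (List Char)) : List (List Char) :=
  if K.getLast? = some [] then K.dropLast else K

lemma pvFoldA (L : List (List Char)) (acc : List (List Char)) :
    L.foldl (fun out ln => if ln = [] ∧ (out = [] ∨ out.getLast? = some []) then out else out ++ [ln]) acc
      = acc ++ pvG (decide (acc = [] ∨ acc.getLast? = some [])) L := by
  induction L generalizing acc with
  | nil => simp [pvG]
  | cons x t ih =>
    simp only [List.foldl_cons]
    by_cases hx : x = []
    · subst hx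
      by_cases hacc : acc = [] ∨ acc.getLast? = some []
      · rw [if_pos ⟨rfl, hacc⟩, ih]
        simp [pvG, hacc]
      · rw [if_neg (by simp [hacc]), ih]
        simp [pvG, hacc]
    · rw [if_neg (by simp [hx]), ih]
      simp [pvG, hx]

-- B's fold computes pvP
lemma pvFoldB (L : List (List Char)) (ps : List (List (List Char))) (cur : List (List Char)) :
    (let st := L.foldl
        (fun (st : List (List (List Char)) × List (List Char)) ln =>
          if ln ≠ [] then (st.1, st.2 ++ [ln])
          else if st.2 ≠ [] then (st.1 ++ [st.2], []) else st)
        (ps, cur)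
     if st.2 ≠ [] then st.1 ++ [st.2] else st.1)
      = ps ++ pvP cur L := by
  induction L generalizing ps cur with
  | nil =>
    by_cases hc : cur = [] <;> simp [pvP, hc]
  | cons x t ih =>
    by_cases hx : x = []
    · subst hx
      by_cases hc : cur = []
      · subst hc
        simpa [pvP] using ih ps []
      · simpa [pvP, hc] using ih (ps ++ [cur]) []
    · simpa [pvP, hx] using ih ps (cur ++ [x])

lemma pvP_nonempty (L : List (List Char)) (cur : List (List Char)) :
    ∀ p ∈ pvP cur L, p ≠ [] := by
  induction L generalizing cur with
  | nil =>
    intro p hp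
    by_cases hc : cur = [] <;> simp [pvP, hc] at hp
    · exact hp ▸ hc
  | cons x t ih =>
    intro p hp
    by_cases hx : x = []
    · subst hx
      by_cases hc : cur = []
      · exact ih [] p (by simpa [pvP, hc] using hp)
      · rcases (by simpa [pvP, hc] using hp : p = cur ∨ p ∈ pvP [] t) with h | h
        · exact h ▸ hc
        · exact ih [] p h
    · exact ih (cur ++ [x]) p (by simpa [pvP, hx] using hp)

lemma pvP_ne_nil (L : List (List Char)) (cur : List (List Char)) (hc : cur ≠ []) :
    pvP cur L ≠ [] := by
  induction L generalizing cur with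
  | nil => simp [pvP, hc]
  | cons x t ih =>
    by_cases hx : x = []
    · simp [pvP, hx, hc]
    · simpa [pvP, hx] using ih (cur ++ [x]) (by simp)

lemma pvP_nil_iff (L : List (List Char)) : pvP [] L = [] ↔ pvG true L = [] := by
  induction L with
  | nil => simp [pvP, pvG]
  | cons x t ih =>
    by_cases hx : x = []
    · simpa [pvP, pvG, hx] using ih
    · simp only [pvP, pvG, if_neg hx]
      constructor
      · intro h; exact absurd h (pvP_ne_nil t [x] (by simp))
      · intro h; simp at h

lemma pvK2_cons (x : List Char) (K : List (List Char)) (hx : x ≠ []) :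
    pvK2 (x :: K) = x :: pvK2 K := by
  cases K with
  | nil => simp [pvK2, hx]
  | cons y K' => by_cases h : (y :: K').getLast? = some [] <;> simp [pvK2, h]

lemma pvK2_blank_cons (K : List (List Char)) (hK : K ≠ []) :
    pvK2 ([] :: K) = [] :: pvK2 K := by
  cases K with
  | nil => exact absurd rfl hK
  | cons y K' => by_cases h : (y :: K').getLast? = some [] <;> simp [pvK2, h]

-- KEY: A's collapsed lines with trailing blank dropped = B's paragraphs with blanks interspersed
lemma pvKey (L : List (List Char)) :
    (pvInter (pvP [] L) = pvK2 (pvG true L)) ∧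
    (∀ cur : List (List Char), cur ≠ [] → pvInter (pvP cur L) = cur ++ pvK2 (pvG false L)) := by
  induction L with
  | nil =>
    constructor
    · simp [pvP, pvG, pvInter, pvK2]
    · intro cur hc
      simp [pvP, pvG, hc, pvInter, pvK2]
  | cons x t ih =>
    obtain ⟨ih1, ih2⟩ := ih
    by_cases hx : x = []
    · subst hx
      constructor
      · simpa [pvP, pvG] using ih1
      · intro cur hc
        have hp' : pvP cur ([] :: t) = cur :: pvP [] t := by simp [pvP, hc]
        have hg' : pvG false ([] :: t) = [] :: pvG true t := by simp [pvG]
        rw [hp', hg']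
        by_cases hK : pvG true t = []
        · have hP : pvP [] t = [] := (pvP_nil_iff t).mpr hK
          simp [hP, hK, pvInter, pvK2]
        · have hP : pvP [] t ≠ [] := fun h => hK ((pvP_nil_iff t).mp h)
          rw [pvK2_blank_cons _ hK, ← ih1]
          rcases hp : pvP [] t with _ | ⟨q, r⟩
          · exact absurd hp hP
          · have hiq : pvInter (cur :: q :: r) = cur ++ [[]] ++ pvInter (q :: r) := rfl
            rw [hiq]
            simp
    · constructor
      · have : pvG true (x :: t) = x :: pvG false t := by simp [pvG, hx]
        rw [this, pvK2_cons _ _ hx]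
        simpa [pvP, hx] using ih2 [x] (by simp)
      · intro cur hc
        have hg : pvG false (x :: t) = x :: pvG false t := by simp [pvG, hx]
        have hp : pvP cur (x :: t) = pvP (cur ++ [x]) t := by simp [pvP, hx]
        rw [hp, hg, pvK2_cons _ _ hx, ih2 (cur ++ [x]) (by simp)]
        simp

-- join distributes over append of nonempty line lists
lemma pvJoinAppend (sep : List Char) (a b : List (List Char)) (ha : a ≠ []) (hb : b ≠ []) :
    PySem.Chars.join sep (a ++ b) = PySem.Chars.join sep a ++ sep ++ PySem.Chars.join sep b := by
  induction a with
  | nil => exact absurd rfl ha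
  | cons x a' ih =>
    cases a' with
    | nil =>
      rcases b with _ | ⟨y, b'⟩
      · exact absurd rfl hb
      · rw [PySem.Chars.join_singleton]
        simpa using PySem.Chars.join_cons_cons sep x y b'
    | cons z a'' =>
      have ih' := ih (by simp)
      have h1 : (x :: z :: a'') ++ b = x :: ((z :: a'') ++ b) := rfl
      rcases hc : (z :: a'') ++ b with _ | ⟨w, ws⟩
      · simp at hc
      · rw [h1, hc, PySem.Chars.join_cons_cons, ← hc, ih', PySem.Chars.join_cons_cons]
        simp

lemma pvInter_nonempty (P : List (List (List Char))) (hP : P ≠ [])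
    (hne : ∀ p ∈ P, p ≠ []) : pvInter P ≠ [] := by
  cases P with
  | nil => exact absurd rfl hP
  | cons p Q =>
    cases Q with
    | nil => exact hne p (by simp)
    | cons q r =>
      have : pvInter (p :: q :: r) = p ++ [[]] ++ pvInter (q :: r) := rfl
      rw [this]
      intro h
      exact hne p (by simp) (by simpa using (List.append_eq_nil_iff.mp (List.append_eq_nil_iff.mp h).1).1)

-- joining blanks-interspersed paragraphs with '\n' = joining joined paragraphs with "\n\n"
lemma pvJoinInter (P : List (List (List Char))) (hne : ∀ p ∈ P, p ≠ []) :
    PySem.Chars.join ['\n'] (pvInter P)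
      = PySem.Chars.join ['\n', '\n'] (P.map (PySem.Chars.join ['\n'])) := by
  induction P with
  | nil => rfl
  | cons p Q ih =>
    cases Q with
    | nil => simp [pvInter, PySem.Chars.join_singleton]
    | cons q r =>
      have hI : pvInter (p :: q :: r) = p ++ ([[]] ++ pvInter (q :: r)) := by simp [pvInter]
      have hqr : pvInter (q :: r) ≠ [] :=
        pvInter_nonempty _ (by simp) (fun x hx => hne x (List.mem_cons_of_mem _ hx))
      rcases hc : pvInter (q :: r) with _ | ⟨w, ws⟩
      · exact absurd hc hqr
      · rw [hI, pvJoinAppend _ _ _ (hne p (by simp)) (by simp), hc, List.singleton_append,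
            PySem.Chars.join_cons_cons, ← hc, ih (fun x hx => hne x (List.mem_cons_of_mem _ hx)),
            List.map_cons, List.map_cons, List.map_cons, PySem.Chars.join_cons_cons]
        simp

-- ===== A-side strip analysis (A's final global strip = dropping one trailing blank line) =====

lemma pvG_true_head (L : List (List Char)) (b : List Char)
    (h : (pvG true L).head? = some b) : b ≠ [] := by
  induction L with
  | nil => simp [pvG] at h
  | cons x t ih =>
    by_cases hx : x = []
    · exact ih (by simpa [pvG, hx] using h)
    · simp only [pvG, if_neg hx, List.head?_cons, Option.some.injEq] at h
      exact h ▸ hx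

lemma pvG_chain (L : List (List Char)) (prev : Bool) :
    List.IsChain (fun a b => a = [] → b ≠ []) (pvG prev L) := by
  induction L generalizing prev with
  | nil => simp [pvG]
  | cons x t ih =>
    by_cases hx : x = []
    · subst hx
      cases prev with
      | true => simpa [pvG] using ih true
      | false =>
        have he : pvG false ([] :: t) = [] :: pvG true t := by simp [pvG]
        rw [he, List.isChain_cons]
        exact ⟨fun b hb _ => pvG_true_head t b (by simpa using hb), ih true⟩
    · have he : pvG prev (x :: t) = x :: pvG false t := by simp [pvG, hx]
      rw [he, List.isChain_cons]
      exact ⟨fun b _ hxe => absurd hxe hx, ih false⟩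

lemma pvG_mem (L : List (List Char)) (prev : Bool) (x : List Char)
    (h : x ∈ pvG prev L) : x = [] ∨ x ∈ L := by
  induction L generalizing prev with
  | nil => simp [pvG] at h
  | cons y t ih =>
    by_cases hy : y = []
    · subst hy
      cases prev with
      | true =>
        rcases ih true (by simpa [pvG] using h) with h' | h'
        · exact Or.inl h'
        · exact Or.inr (List.mem_cons_of_mem _ h')
      | false =>
        rcases (by simpa [pvG] using h : x = [] ∨ x ∈ pvG true t) with h' | h'
        · exact Or.inl h'
        · rcases ih true h' with h'' | h''
          · exact Or.inl h''
          · exact Or.inr (List.mem_cons_of_mem _ h'')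
    · rcases (by simpa [pvG, hy] using h : x = y ∨ x ∈ pvG false t) with h' | h'
      · exact Or.inr (h' ▸ List.mem_cons_self)
      · rcases ih false h' with h'' | h''
        · exact Or.inl h''
        · exact Or.inr (List.mem_cons_of_mem _ h'')

lemma pvHeadDropWhile (p : Char → Bool) (l : List Char) (a : Char)
    (h : (l.dropWhile p).head? = some a) : p a = false := by
  induction l with
  | nil => simp at h
  | cons x t ih =>
    rw [List.dropWhile_cons] at h
    split at h
    · exact ih h
    · simp_all

lemma pvRstripPrefix (z : List Char) : PySem.Chars.rstrip z <+: z := by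
  have hs : List.dropWhile PySem.Chars.isspace z.reverse <:+ z.reverse :=
    List.dropWhile_suffix _
  simpa [PySem.Chars.rstrip] using List.reverse_prefix.mpr hs

lemma pvHeadNonspace (y : List Char) (c : Char)
    (h : (PySem.Chars.strip y).head? = some c) : PySem.Chars.isspace c = false := by
  have hpre := pvRstripPrefix (PySem.Chars.lstrip y)
  obtain ⟨r, hr⟩ := hpre
  have hl : (PySem.Chars.lstrip y).head? = some c := by
    rw [← hr, List.head?_append]
    simp [PySem.Chars.strip] at h
    simp [h]
  exact pvHeadDropWhile _ _ _ (by simpa [PySem.Chars.lstrip] using hl)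

lemma pvLastNonspace (y : List Char) (c : Char)
    (h : (PySem.Chars.strip y).getLast? = some c) : PySem.Chars.isspace c = false := by
  have h' : (List.dropWhile PySem.Chars.isspace (PySem.Chars.lstrip y).reverse).head? = some c := by
    have := h
    simp only [PySem.Chars.strip, PySem.Chars.rstrip] at this
    rwa [List.getLast?_reverse] at this
  exact pvHeadDropWhile _ _ _ h'

lemma pvLstripEqSelf (l : List Char)
    (h : ∀ c, l.head? = some c → PySem.Chars.isspace c = false) :
    PySem.Chars.lstrip l = l := by
  cases l with
  | nil => rfl
  | cons a t =>
    have := h a rfl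
    simp [PySem.Chars.lstrip, this]

lemma pvRstripEqSelf (l : List Char)
    (h : ∀ c, l.getLast? = some c → PySem.Chars.isspace c = false) :
    PySem.Chars.rstrip l = l := by
  rcases hl : l.reverse with _ | ⟨a, t⟩
  · have : l = [] := by simpa using congrArg List.reverse hl
    simp [this, PySem.Chars.rstrip]
  · have hl' : l = t.reverse ++ [a] := by
      have := congrArg List.reverse hl
      simpa using this
    have ha : l.getLast? = some a := by rw [hl']; exact List.getLast?_concat
    have hsp := h a ha
    simp [PySem.Chars.rstrip, hl, hsp]
    simpa using congrArg List.reverse hl.symm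

lemma pvRstripConcat (l : List Char) :
    PySem.Chars.rstrip (l ++ ['\n']) = PySem.Chars.rstrip l := by
  simp [PySem.Chars.rstrip, (by decide : PySem.Chars.isspace '\n' = true)]

lemma pvJoinHead (sep : List Char) (h : List Char) (t : List (List Char)) (hh : h ≠ []) :
    (PySem.Chars.join sep (h :: t)).head? = h.head? := by
  cases t with
  | nil => rw [PySem.Chars.join_singleton]
  | cons q r =>
    rw [PySem.Chars.join_cons_cons]
    cases h with
    | nil => exact absurd rfl hh
    | cons a s => simp

lemma pvJoinLast (sep : List Char) (M : List (List Char)) (m : List Char) (hm : m ≠ []) :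
    (PySem.Chars.join sep (M ++ [m])).getLast? = m.getLast? := by
  induction M with
  | nil => rw [List.nil_append, PySem.Chars.join_singleton]
  | cons a M' ih =>
    have hne : M' ++ [m] ≠ [] := by simp
    rcases hx : M' ++ [m] with _ | ⟨q, r⟩
    · exact absurd hx hne
    · rw [List.cons_append, hx, PySem.Chars.join_cons_cons, ← hx, List.getLast?_append, ih]
      rcases hm' : m.getLast? with _ | c
      · cases m with
        | nil => exact absurd rfl hm
        | cons b s => simp at hm'
      · rfl

lemma pvJoinConcatNil (sep : List Char) (M : List (List Char)) (hM : M ≠ []) :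
    PySem.Chars.join sep (M ++ [[]]) = PySem.Chars.join sep M ++ sep := by
  induction M with
  | nil => exact absurd rfl hM
  | cons a M' ih =>
    cases M' with
    | nil =>
      simp [PySem.Chars.join_cons_cons, PySem.Chars.join_singleton]
    | cons b r =>
      have ih' := ih (by simp)
      simp only [List.cons_append] at ih' ⊢
      rw [PySem.Chars.join_cons_cons, ih', PySem.Chars.join_cons_cons]
      simp

-- A's final global strip equals dropping one trailing blank line, on the collapsed lines
lemma pvMain (L : List (List Char)) (hs : ∀ l ∈ L, ∃ y, l = PySem.Chars.strip y) :
    PySem.Chars.strip (PySem.Chars.join ['\n'] (pvG true L)) =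
      PySem.Chars.join ['\n'] (pvK2 (pvG true L)) := by
  rcases hKc : pvG true L with _ | ⟨h, t⟩
  · simp [PySem.Chars.join_nil, pvK2]
    decide
  · have hmemStrip : ∀ m ∈ h :: t, m ≠ [] → ∃ y, m = PySem.Chars.strip y := by
      intro m hm _
      rcases pvG_mem L true m (hKc ▸ hm) with h' | h'
      · exact ⟨[], by simpa [h'] using (by decide : PySem.Chars.strip ([] : List Char) = [])⟩
      · exact hs m h'
    have hh : h ≠ [] := pvG_true_head L h (by rw [hKc]; rfl)
    obtain ⟨yh, hyh⟩ := hmemStrip h List.mem_cons_self hh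
    have hheadns : ∀ c, (PySem.Chars.join ['\n'] (h :: t)).head? = some c →
        PySem.Chars.isspace c = false := by
      intro c hc
      rw [pvJoinHead _ _ _ hh] at hc
      exact pvHeadNonspace yh c (hyh ▸ hc)
    by_cases hlast : (h :: t).getLast? = some []
    · -- trailing blank line: strip removes the final '\n', pvK2 drops the blank line
      obtain ⟨M, hM⟩ := List.getLast?_eq_some_iff.mp hlast
      have hMne : M ≠ [] := by
        intro h0
        rw [h0, List.nil_append] at hM
        injection hM with h1 _
        exact hh h1
      have hchain : List.IsChain (fun a b : List Char => a = [] → b ≠ []) (M ++ [[]]) := by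
        have := pvG_chain L true
        rwa [hKc, hM] at this
      rcases hgl : M.getLast? with _ | m'
      · exact absurd (List.getLast?_eq_none_iff.mp hgl) hMne
      have hm'ne : m' ≠ [] := by
        intro hm'e
        have hR := (List.isChain_append.mp hchain).2.2 m' (by simp [hgl]) [] (by simp)
        exact hR hm'e rfl
      have hm'mem : m' ∈ h :: t := by
        obtain ⟨M'', hM''⟩ := List.getLast?_eq_some_iff.mp hgl
        rw [hM, hM'']
        simp
      obtain ⟨ym, hym⟩ := hmemStrip m' hm'mem hm'ne
      have hlastns : ∀ c, (PySem.Chars.join ['\n'] M).getLast? = some c →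
          PySem.Chars.isspace c = false := by
        intro c hc
        obtain ⟨M'', hM''⟩ := List.getLast?_eq_some_iff.mp hgl
        rw [hM'', pvJoinLast _ _ _ hm'ne] at hc
        exact pvLastNonspace ym c (hym ▸ hc)
      have hjoin : PySem.Chars.join ['\n'] (h :: t) = PySem.Chars.join ['\n'] M ++ ['\n'] := by
        rw [hM]
        exact pvJoinConcatNil _ _ hMne
      have hdl : (h :: t).dropLast = M := by
        rw [hM]
        exact List.dropLast_concat
      rw [pvK2, if_pos hlast, hdl, hjoin]
      show PySem.Chars.rstrip (PySem.Chars.lstrip _) = _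
      rw [pvLstripEqSelf _ (by
        intro c hc
        exact hheadns c (by rwa [hjoin]))]
      rw [pvRstripConcat, pvRstripEqSelf _ hlastns]
    · -- no trailing blank: the join is already stripped
      rw [pvK2, if_neg hlast]
      rcases hgl : (h :: t).getLast? with _ | m
      · simp at hgl
      have hmne : m ≠ [] := fun hme => hlast (by rw [hgl, hme])
      obtain ⟨M, hM⟩ := List.getLast?_eq_some_iff.mp hgl
      have hmmem : m ∈ h :: t := by rw [hM]; simp
      obtain ⟨ym, hym⟩ := hmemStrip m hmmem hmne
      show PySem.Chars.rstrip (PySem.Chars.lstrip _) = _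
      rw [pvLstripEqSelf _ hheadns, pvRstripEqSelf _ (by
        intro c hc
        rw [hM, pvJoinLast _ _ _ hmne] at hc
        exact pvLastNonspace ym c (hym ▸ hc))]

-- ===== VERDICT (by name: the statement is the Claim_ definition above) =====
theorem norm_desc_keep_newlines_py_spec : Claim_equal_norm_desc_keep_newlines_py := by
  intro s _
  unfold Spec_norm_desc_keep_newlines_py norm_desc_keep_newlines_py norm_desc_keep_newlines_py_alt
  simp only []
  set L := (PySem.Chars.splitOn s.toList ['\n']).map pvNormSpacesBasicA with hL
  -- B's fold over the raw split lines = the same fold over L with the normalization mapped out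
  have hBfold : ∀ ps cur, (PySem.Chars.splitOn s.toList ['\n']).foldl
      (fun (st : List (List (List Char)) × List (List Char)) raw =>
        let ln := PySem.Chars.strip (PySem.Chars.replace (PySem.Chars.replace (PySem.Chars.replace
          (PySem.Chars.replace raw [Char.ofNat 160] [' ']) [Char.ofNat 8239] [' ']) ['\r'] [' ']) ['\t'] [' '])
        if ln ≠ [] then (st.1, st.2 ++ [ln])
        else if st.2 ≠ [] then (st.1 ++ [st.2], []) else st) (ps, cur)
      = L.foldl (fun (st : List (List (List Char)) × List (List Char)) ln =>
          if ln ≠ [] then (st.1, st.2 ++ [ln])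
          else if st.2 ≠ [] then (st.1 ++ [st.2], []) else st) (ps, cur) := by
    intro ps cur
    rw [hL, List.foldl_map]
    rfl
  rw [hBfold, pvFoldA, pvFoldB]
  have hd : decide (([] : List (List Char)) = [] ∨ ([] : List (List Char)).getLast? = some []) = true := by decide
  rw [hd, List.nil_append, List.nil_append]
  have hstrip : ∀ l ∈ L, ∃ y, l = PySem.Chars.strip y := by
    intro l hl
    rw [hL] at hl
    obtain ⟨x, _, hx⟩ := List.mem_map.mp hl
    exact ⟨_, hx.symm⟩
  rw [pvMain L hstrip, ← (pvKey L).1,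
      pvJoinInter _ (pvP_nonempty L [])]
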